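-- pv_equiv track=rewrite | github.com/AntonioIrineuFilho/Python-Codes | maior_string.py | menor_string
-- ===== SOURCE A (Python) =====
-- def menor_string(lista):
--     menor = lista[0]
--     for i in range(len(lista)):
--         if (len(lista[i]) < len(menor)):
--             menor = lista[i]
--     menores = [menor]
--     for j in range(len(lista)):
--         if (len(lista[j]) == len(menor) and lista[j] != menor):
--             menores.append(lista[j])
--     return menores
-- ===== SOURCE B (Python) =====
-- def menor_string(lista):
--     # Single pass: maintain the bucket of all minimal-length strings seen so far,
--     # resetting it whenever a strictly shorter string appears.
--     bucket = None
--     for s in lista: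
--         if bucket is None or len(s) < len(bucket[0]):
--             bucket = [s]
--         elif len(s) == len(bucket[0]):
--             bucket.append(s)
--     menor = bucket[0]
--     return [menor] + [s for s in bucket if s != menor]
-- ===== Notes on version B (the rewrite author's own statement) =====
-- stated objective: alternative
-- what changed: Replaces A's two staged passes (a running-shortest scan, then a rescan collecting equal-length strings) with a single pass that maintains the bucket of all minimal-length strings, resetting it when a strictly shorter string appears; the answer is read off the bucket.
import Mathlib
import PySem

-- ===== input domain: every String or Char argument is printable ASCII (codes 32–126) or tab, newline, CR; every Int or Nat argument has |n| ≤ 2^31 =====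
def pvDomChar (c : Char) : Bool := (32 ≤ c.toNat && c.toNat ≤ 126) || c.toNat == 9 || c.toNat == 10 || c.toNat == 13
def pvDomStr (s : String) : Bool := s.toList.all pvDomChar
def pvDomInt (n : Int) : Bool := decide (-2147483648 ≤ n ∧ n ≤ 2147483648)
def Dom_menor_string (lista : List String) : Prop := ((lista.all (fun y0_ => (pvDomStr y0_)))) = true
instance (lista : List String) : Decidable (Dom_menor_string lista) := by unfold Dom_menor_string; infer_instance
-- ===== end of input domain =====

-- B replaces A's two staged passes (running-shortest scan, then a rescan collecting equal-length
-- strings) with ONE pass maintaining the bucket of all minimal-length strings seen so far,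
-- resetting it whenever a strictly shorter string appears (objective: alternative).

-- ===== PORT A =====
def menor_string (lista : List String) : List String :=
  match PySem.List.pyGet? lista 0 with
  | none => []  -- lista[0] raises IndexError on the empty list; excluded by Pre_
  | some m0 =>
    let menor := (PySem.List.pyRange 0 (lista.length : Int) 1).foldl
      (fun menor i =>
        if PySem.Str.len (PySem.List.pyGetD lista i "") < PySem.Str.len menor
        then PySem.List.pyGetD lista i "" else menor) m0
    (PySem.List.pyRange 0 (lista.length : Int) 1).foldl
      (fun menores j =>
        if PySem.Str.len (PySem.List.pyGetD lista j "") == PySem.Str.len menor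
            && PySem.List.pyGetD lista j "" != menor
        then menores ++ [PySem.List.pyGetD lista j ""] else menores) [menor]

-- ===== PORT B =====
-- B's loop body: Python's 'bucket = None' is represented by [] (the bucket, once set, is never empty)
def pvStep (b : List String) (s : String) : List String :=
  match b with
  | [] => [s]
  | m :: _ =>
    if PySem.Str.len s < PySem.Str.len m then [s]
    else if PySem.Str.len s == PySem.Str.len m then b ++ [s]
    else b

def menor_string_alt (lista : List String) : List String :=
  let bucket := lista.foldl pvStep []
  match bucket with
  | [] => []  -- bucket is still None: bucket[0] raises; excluded by Pre_
  | menor :: _ => menor :: bucket.filter (fun s => s != menor)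

-- ===== PRECONDITION & SPEC =====
-- Pre_ excludes only the empty list, on which A raises IndexError (lista[0]); B raises TypeError there.
def Pre_menor_string (lista : List String) : Prop := lista ≠ []
instance (lista : List String) : Decidable (Pre_menor_string lista) := by unfold Pre_menor_string; infer_instance
def pvWitness_menor_string : List String := (["ab", "c", "d", "c"])

def Spec_menor_string (lista : List String) (out : List String) : Prop := out = menor_string_alt lista
instance (lista : List String) (out : List String) : Decidable (Spec_menor_string lista out) := by unfold Spec_menor_string; infer_instance

-- ===== CLAIM (what is proved, stated in full; the proofs are below) =====
def Claim_equal_menor_string : Prop := ∀ (lista : List String), Dom_menor_string lista → Pre_menor_string lista → Spec_menor_string lista (menor_string lista)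

-- ===== LEMMAS AND PROOFS =====

-- A's running-min step, and the numeric minimum of the lengths (fold form)
def pvG (m s : String) : String := if PySem.Str.len s < PySem.Str.len m then s else m
def pvM (h : String) (t : List String) : Int := t.foldl (fun m s => min m (PySem.Str.len s)) (PySem.Str.len h)

lemma pvFoldMin_le (t : List String) (a : Int) :
    t.foldl (fun m s => min m (PySem.Str.len s)) a ≤ a := by
  induction t generalizing a with
  | nil => simp
  | cons c t ih => exact le_trans (ih _) (min_le_left _ _)

lemma pvM_le_head (h : String) (t : List String) : pvM h t ≤ PySem.Str.len h :=
  pvFoldMin_le t _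

lemma pvM_append_one (h : String) (P : List String) (s : String) :
    pvM h (P ++ [s]) = min (pvM h P) (PySem.Str.len s) := by
  simp [pvM, List.foldl_append]

-- the minimum of the lengths is attained by some element
lemma pvM_attained (t : List String) (h : String) :
    ∃ x ∈ h :: t, PySem.Str.len x = pvM h t := by
  induction t generalizing h with
  | nil => exact ⟨h, by simp, by simp [pvM]⟩
  | cons c t ih =>
    by_cases hc : PySem.Str.len c < PySem.Str.len h
    · obtain ⟨x, hx, he⟩ := ih c
      refine ⟨x, ?_, ?_⟩
      · rcases List.mem_cons.mp hx with hx | hx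
        · subst hx; simp
        · simp [hx]
      · rw [he]; simp only [pvM, List.foldl_cons]
        rw [min_eq_right (le_of_lt hc)]
    · obtain ⟨x, hx, he⟩ := ih h
      refine ⟨x, ?_, ?_⟩
      · rcases List.mem_cons.mp hx with hx | hx
        · subst hx; simp
        · simp [hx]
      · rw [he]; simp only [pvM, List.foldl_cons]
        rw [min_eq_left (le_of_not_gt hc)]

-- every element's length is at least the minimum
lemma pvM_le_mem (t : List String) (h : String) (x : String) (hx : x ∈ h :: t) :
    pvM h t ≤ PySem.Str.len x := by
  induction t generalizing h with
  | nil =>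
    have : x = h := by simpa using hx
    subst this; simp [pvM]
  | cons c t ih =>
    have hfold : pvM h (c :: t) = t.foldl (fun m s => min m (PySem.Str.len s))
        (min (PySem.Str.len h) (PySem.Str.len c)) := by
      simp [pvM]
    rcases List.mem_cons.mp hx with hx | hx
    · subst hx
      calc pvM x (c :: t) ≤ min (PySem.Str.len x) (PySem.Str.len c) := by
              rw [hfold]; exact pvFoldMin_le _ _
        _ ≤ PySem.Str.len x := min_le_left _ _
    · rcases List.mem_cons.mp hx with hx | hx
      · subst hx
        calc pvM h (x :: t) ≤ min (PySem.Str.len h) (PySem.Str.len x) := by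
                rw [hfold]; exact pvFoldMin_le _ _
          _ ≤ PySem.Str.len x := min_le_right _ _
      · by_cases hc : PySem.Str.len c < PySem.Str.len h
        · have := ih c (by simp [hx])
          rw [hfold, min_eq_right (le_of_lt hc)]
          exact this
        · have := ih h (by simp [hx])
          rw [hfold, min_eq_left (le_of_not_gt hc)]
          exact this

-- B's single-pass bucket fold computes the minimal-length filter of the processed prefix
lemma bucket_inv (t : List String) (h : String) (P : List String) :
    t.foldl pvStep ((h :: P).filter (fun s => PySem.Str.len s == pvM h P))
      = ((h :: P) ++ t).filter (fun s => PySem.Str.len s == pvM h (P ++ t)) := by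
  induction t generalizing P with
  | nil => simp
  | cons s t ih =>
    obtain ⟨x, hx, hxe⟩ := pvM_attained P h
    have hBne : (h :: P).filter (fun s => PySem.Str.len s == pvM h P) ≠ [] := by
      intro hnil
      have : x ∈ (h :: P).filter (fun s => PySem.Str.len s == pvM h P) :=
        List.mem_filter.mpr ⟨hx, by simpa using hxe⟩
      rw [hnil] at this; cases this
    obtain ⟨m, bs, hB⟩ := List.exists_cons_of_ne_nil hBne
    have hm : PySem.Str.len m = pvM h P := by
      have : m ∈ (h :: P).filter (fun s => PySem.Str.len s == pvM h P) := by
        rw [hB]; exact List.mem_cons_self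
      have := List.of_mem_filter this
      simpa using this
    have hstep : pvStep ((h :: P).filter (fun s => PySem.Str.len s == pvM h P)) s
        = (h :: (P ++ [s])).filter (fun u => PySem.Str.len u == pvM h (P ++ [s])) := by
      rw [hB]
      show (if PySem.Str.len s < PySem.Str.len m then [s]
            else if PySem.Str.len s == PySem.Str.len m then (m :: bs) ++ [s]
            else m :: bs) = _
      rw [hm]
      by_cases h1 : PySem.Str.len s < pvM h P
      · rw [if_pos h1]
        have hmin : pvM h (P ++ [s]) = PySem.Str.len s := by
          rw [pvM_append_one]; exact min_eq_right (le_of_lt h1)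
        have hdrop : (h :: P).filter (fun u => PySem.Str.len u == pvM h (P ++ [s])) = [] := by
          rw [List.filter_eq_nil_iff]
          intro u hu
          have h3 := pvM_le_mem P h u hu
          rw [hmin]
          simp only [beq_iff_eq, PySem.Str.len_eq, String.length_toList] at h1 h3 ⊢
          omega
        have : (h :: (P ++ [s])) = (h :: P) ++ [s] := by simp
        rw [this, List.filter_append, hdrop, hmin]
        simp
      · rw [if_neg h1]
        by_cases h2 : PySem.Str.len s = pvM h P
        · have hmin : pvM h (P ++ [s]) = pvM h P := by
            rw [pvM_append_one, h2]; simp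
          have : (h :: (P ++ [s])) = (h :: P) ++ [s] := by simp
          have h2' : (PySem.Str.len s == pvM h P) = true := by simpa using h2
          rw [if_pos h2', this, List.filter_append, hmin, ← hB]
          simp only [PySem.Str.len_eq, String.length_toList] at h2'
          simp [h2']
        · have hgt : (PySem.Str.len s == pvM h P) = false := by simpa using h2
          have hmin : pvM h (P ++ [s]) = pvM h P := by
            rw [pvM_append_one]
            refine min_eq_left ?_
            simp only [PySem.Str.len_eq] at h1 h2 ⊢
            omega
          have : (h :: (P ++ [s])) = (h :: P) ++ [s] := by simp
          have h2' : ¬ ((s.length : Int) = pvM h P) := by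
            simpa [PySem.Str.len_eq, String.length_toList] using h2
          rw [hgt, this, List.filter_append, hmin, ← hB]
          simp [h2']
    rw [List.foldl_cons, hstep, ih (P ++ [s])]
    simp

lemma bucket_eq (t : List String) (h : String) :
    (h :: t).foldl pvStep [] = (h :: t).filter (fun s => PySem.Str.len s == pvM h t) := by
  have h0 : pvStep [] h = (h :: ([] : List String)).filter
      (fun s => PySem.Str.len s == pvM h []) := by
    simp [pvStep, pvM]
  rw [List.foldl_cons, h0, bucket_inv t h []]
  simp

-- A's running-min fold is the head of the minimal-length bucket
lemma runmin (t : List String) (h : String) :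
    ∃ rest, (h :: t).filter (fun s => PySem.Str.len s == pvM h t) = (t.foldl pvG h) :: rest := by
  induction t generalizing h with
  | nil => exact ⟨[], by simp [pvM]⟩
  | cons c t ih =>
    by_cases hc : PySem.Str.len c < PySem.Str.len h
    · have hmin : min (PySem.Str.len h) (PySem.Str.len c) = PySem.Str.len c :=
        min_eq_right (le_of_lt hc)
      have hM : pvM h (c :: t) = pvM c t := by
        simp only [pvM, List.foldl_cons]; rw [hmin]
      have hfold : (c :: t).foldl pvG h = t.foldl pvG c := by
        rw [List.foldl_cons]; unfold pvG; rw [if_pos hc]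
      have hph : (PySem.Str.len h == pvM c t) = false := by
        have h1 := pvM_le_head c t
        simp only [beq_eq_false_iff_ne, ne_eq]
        simp only [PySem.Str.len_eq] at h1 hc ⊢
        omega
      obtain ⟨rest, hr⟩ := ih c
      refine ⟨rest, ?_⟩
      rw [hM, hfold, List.filter_cons, hph]
      simpa using hr
    · have hle : PySem.Str.len h ≤ PySem.Str.len c := le_of_not_gt hc
      have hmin : min (PySem.Str.len h) (PySem.Str.len c) = PySem.Str.len h :=
        min_eq_left hle
      have hM : pvM h (c :: t) = pvM h t := by
        simp only [pvM, List.foldl_cons]; rw [hmin]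
      have hfold : (c :: t).foldl pvG h = t.foldl pvG h := by
        rw [List.foldl_cons]; unfold pvG; rw [if_neg hc]
      obtain ⟨rest, hr⟩ := ih h
      rw [hM, hfold]
      by_cases hpc : PySem.Str.len c = pvM h t
      · have hhM : PySem.Str.len h = pvM h t := by
          have h1 := pvM_le_head h t
          simp only [PySem.Str.len_eq] at h1 hle hpc ⊢
          omega
        have hhd : t.foldl pvG h = h := by
          rw [List.filter_cons] at hr
          simp only [hhM, beq_self_eq_true, if_true] at hr
          exact (List.cons_eq_cons.mp hr).1.symm
        refine ⟨c :: t.filter (fun s => PySem.Str.len s == pvM h t), ?_⟩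
        rw [List.filter_cons, List.filter_cons, hhd]
        simp only [PySem.Str.len_eq] at hhM hpc
        simp only [← hhM]
        have hl : c.toList.length = h.toList.length := by omega
        simp_all
      · refine ⟨rest, ?_⟩
        rw [← hr, List.filter_cons, List.filter_cons, List.filter_cons]
        have hpcf : (PySem.Str.len c == pvM h t) = false := by
          simpa using hpc
        rw [hpcf]
        simp

-- ===== VERDICT (by name: the statement is the Claim_ definition above) =====
theorem menor_string_spec : Claim_equal_menor_string := by
  intro lista _hdom hpre
  unfold Spec_menor_string
  match lista, hpre with
  | h :: t, _ =>
    unfold menor_string menor_string_alt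
    rw [PySem.List.pyGet?_zero_cons]
    dsimp only
    rw [PySem.List.foldl_pyRange_zero_pyGetD' (h :: t) ""
          (fun m s => if PySem.Str.len s < PySem.Str.len m then s else m) h]
    have e1 : (h :: t).foldl (fun m s => if PySem.Str.len s < PySem.Str.len m then s else m) h
        = t.foldl pvG h := by
      rw [List.foldl_cons, if_neg (lt_irrefl _)]
      rfl
    rw [e1]
    set menorA := t.foldl pvG h with hmenorA
    rw [PySem.List.foldl_pyRange_zero_pyGetD' (h :: t) ""
          (fun acc s => if PySem.Str.len s == PySem.Str.len menorA && s != menorA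
                        then acc ++ [s] else acc) [menorA]]
    rw [PySem.List.foldl_append_if_eq_filter]
    obtain ⟨rest, hr⟩ := runmin t h
    rw [bucket_eq t h, hr]
    dsimp only
    rw [← hr]
    -- menorA has minimal length
    have hlen : PySem.Str.len menorA = pvM h t := by
      have hm : menorA ∈ (h :: t).filter (fun s => PySem.Str.len s == pvM h t) := by
        rw [hr]; exact List.mem_cons_self
      have := List.of_mem_filter hm
      simpa using this
    rw [List.filter_filter, List.singleton_append]
    congr 1
    apply List.filter_congr
    intro s _
    rw [hlen, Bool.and_comm]
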